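-- pv_equiv track=rewrite | github.com/yqwang1/AST | AST_trgen_ver2.py | validate_no_long_pattern
-- ===== SOURCE A (Python) =====
-- def validate_no_long_pattern(sequence: list, max_streak: int) -> bool:
--     streak = 1
--     for i in range(1, len(sequence)):
--         if sequence[i] == sequence[i - 1]:
--             streak += 1
--             if streak >= max_streak:
--                 return False
--         else:
--             streak = 1
--     return True
-- ===== SOURCE B (Python) =====
-- def validate_no_long_pattern(sequence: list, max_streak: int) -> bool:
--     # Build the run-length encoding in one pass, then check every run's length.
--     runs = []
--     for x in sequence:
--         if runs and runs[-1][0] == x: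
--             runs[-1] = (x, runs[-1][1] + 1)
--         else:
--             runs.append((x, 1))
--     return all(n < max_streak for _, n in runs)
-- ===== Notes on version B (the rewrite author's own statement) =====
-- stated objective: alternative
-- what changed: B first builds the run-length encoding of the sequence in one pass and then checks every run's length against max_streak, instead of maintaining a live streak counter with an early return inside the scan; Pre_ excludes nonempty duplicate-free sequences with the degenerate threshold max_streak <= 1, where no caller specifies whether a lone element counts as a streak reaching the limit and A (pass) and B (fail) are both defensible.
-- outside the precondition, e.g. on validate_no_long_pattern([0], 1): A returns True, B returns False; on validate_no_long_pattern([1, 2, 3], 0): A returns True, B returns False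
import Mathlib
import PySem

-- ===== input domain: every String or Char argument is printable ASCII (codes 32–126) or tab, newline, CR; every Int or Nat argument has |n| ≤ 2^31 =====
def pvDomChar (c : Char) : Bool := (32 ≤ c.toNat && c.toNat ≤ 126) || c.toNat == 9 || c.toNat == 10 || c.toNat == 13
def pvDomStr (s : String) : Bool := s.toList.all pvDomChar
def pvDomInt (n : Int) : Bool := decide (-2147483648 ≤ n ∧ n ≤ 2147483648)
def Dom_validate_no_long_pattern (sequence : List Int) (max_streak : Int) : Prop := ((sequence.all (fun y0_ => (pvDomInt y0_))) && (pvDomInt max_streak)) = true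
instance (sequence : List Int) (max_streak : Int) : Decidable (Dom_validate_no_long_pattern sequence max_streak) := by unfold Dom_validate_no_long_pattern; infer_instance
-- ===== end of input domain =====

-- B builds the run-length encoding first and then checks every run's length
-- (alternative decomposition); degenerate thresholds max_streak ≤ 1 are excluded by Pre_ below.

-- ===== PORT A =====
-- A's loop over i in range(1, len): state = streak, comparing sequence[i] with sequence[i-1];
-- transliterated as recursion carrying the previous element and the streak, early return False.
def aGo (max_streak : Int) (prev : Int) (rest : List Int) (streak : Int) : Bool :=
  match rest with
  | [] => true
  | x :: xs =>
    if x = prev then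
      if streak + 1 ≥ max_streak then false
      else aGo max_streak x xs (streak + 1)
    else aGo max_streak x xs 1

def validate_no_long_pattern (sequence : List Int) (max_streak : Int) : Bool :=
  match sequence with
  | [] => true
  | x :: xs => aGo max_streak x xs 1

-- ===== PORT B =====
-- runs is built by Source B's single foldl pass (last run kept at the head of the
-- accumulator, mirroring runs[-1]; reversed at the end to restore list order).
def bStep (acc : List (Int × Int)) (x : Int) : List (Int × Int) :=
  match acc with
  | (v, n) :: rest => if v = x then (x, n + 1) :: rest else (x, 1) :: (v, n) :: rest
  | [] => [(x, 1)]

def bOk (max_streak : Int) (r : Int × Int) : Bool :=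
  decide (r.2 < max_streak)

def validate_no_long_pattern_alt (sequence : List Int) (max_streak : Int) : Bool :=
  ((sequence.foldl bStep []).reverse).all (bOk max_streak)

-- ===== PRECONDITION & SPEC =====
-- Pre_ excludes nonempty duplicate-free sequences with the degenerate threshold max_streak ≤ 1:
-- no caller specifies whether a lone element counts as a streak reaching such a limit, so
-- A (pass, it checks only after an increment) and B (fail, a length-1 run reaches the limit)
-- are both defensible there.
def Pre_validate_no_long_pattern (sequence : List Int) (max_streak : Int) : Prop :=
  2 ≤ max_streak ∨ sequence = [] ∨ ¬ List.IsChain (fun a b => a ≠ b) sequence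
instance (sequence : List Int) (max_streak : Int) : Decidable (Pre_validate_no_long_pattern sequence max_streak) := by unfold Pre_validate_no_long_pattern; infer_instance

def pvWitness_validate_no_long_pattern : List Int × Int := ([1, 1, 2], 3)

def Spec_validate_no_long_pattern (sequence : List Int) (max_streak : Int) (out : Bool) : Prop := out = validate_no_long_pattern_alt sequence max_streak
instance (sequence : List Int) (max_streak : Int) (out : Bool) : Decidable (Spec_validate_no_long_pattern sequence max_streak out) := by unfold Spec_validate_no_long_pattern; infer_instance

-- ===== CLAIM (what is proved, stated in full; the proofs are below) =====
def Claim_equal_validate_no_long_pattern : Prop := ∀ (sequence : List Int) (max_streak : Int), Dom_validate_no_long_pattern sequence max_streak → Pre_validate_no_long_pattern sequence max_streak → Spec_validate_no_long_pattern sequence max_streak (validate_no_long_pattern sequence max_streak)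

-- ===== LEMMAS AND PROOFS =====

-- The fold only ever modifies the head of the accumulator; the tail survives as a suffix.
theorem bFold_suffix (xs : List Int) (h : Int × Int) (t : List (Int × Int)) :
    ∃ h2 t2, xs.foldl bStep (h :: t) = h2 :: (t2 ++ t) := by
  induction xs generalizing h t with
  | nil => exact ⟨h, [], rfl⟩
  | cons x xs ih =>
    simp only [List.foldl_cons, bStep]
    by_cases hx : h.1 = x
    · simp only [hx]
      exact ih (x, h.2 + 1) t
    · simp only [if_neg hx]
      obtain ⟨h2, t2, he⟩ := ih (x, 1) ((h.1, h.2) :: t)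
      exact ⟨h2, t2 ++ [(h.1, h.2)], by simpa using he⟩

-- Once the current run's count reaches max_streak, B's final check fails.
theorem bFold_bad (m : Int) (xs : List Int) (p s : Int) (t : List (Int × Int))
    (hm : m ≤ s) :
    (xs.foldl bStep ((p, s) :: t)).all (bOk m) = false := by
  induction xs generalizing p s t with
  | nil =>
    have hbad : bOk m (p, s) = false := by simp [bOk]; omega
    rw [List.foldl_nil, List.all_cons, hbad]
    simp
  | cons x xs ih =>
    simp only [List.foldl_cons, bStep]
    by_cases hx : p = x
    · simp only [if_pos hx]
      exact ih x (s + 1) t (by omega)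
    · simp only [if_neg hx]
      obtain ⟨h2, t2, he⟩ := bFold_suffix xs (x, 1) ((p, s) :: t)
      rw [he]
      have hbad : bOk m (p, s) = false := by simp [bOk]; omega
      rw [List.all_eq_false]
      exact ⟨(p, s), by simp, by simp [hbad]⟩

-- Main invariant for max_streak ≥ 2: with a live run (p, s), 1 ≤ s < m,
-- B's check on the fold result equals earlier runs' check && A's remaining loop.
theorem main_inv (m : Int) (xs : List Int) (p s : Int) (t : List (Int × Int))
    (hm : 2 ≤ m) (h1 : 1 ≤ s) (hs : s < m) :
    (xs.foldl bStep ((p, s) :: t)).all (bOk m) = (t.all (bOk m) && aGo m p xs s) := by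
  induction xs generalizing p s t with
  | nil =>
    have hok : bOk m (p, s) = true := by simp [bOk]; omega
    simp [aGo, hok, Bool.and_comm]
  | cons x xs ih =>
    simp only [List.foldl_cons, bStep, aGo]
    by_cases hx : x = p
    · have hx' : p = x := hx.symm
      simp only [if_pos hx', if_pos hx]
      by_cases hge : s + 1 ≥ m
      · rw [if_pos hge, bFold_bad m xs x (s + 1) t (by omega)]
        simp
      · rw [if_neg hge]
        exact ih x (s + 1) t (by omega) (by omega)
    · have hx' : ¬ p = x := fun h => hx h.symm
      simp only [if_neg hx', if_neg hx]
      have hok : bOk m (p, s) = true := by simp [bOk]; omega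
      rw [ih x 1 ((p, s) :: t) (by omega) (by omega)]
      simp [hok]

-- With max_streak ≤ 1, B fails on any nonempty sequence: the fold result is nonempty
-- and its head run has count ≥ 1 ≥ max_streak.
theorem bFold_head_pos (xs : List Int) (h : Int × Int) (t : List (Int × Int))
    (hh : 1 ≤ h.2) :
    ∃ h2 t2, xs.foldl bStep (h :: t) = h2 :: t2 ∧ 1 ≤ h2.2 := by
  induction xs generalizing h t with
  | nil => exact ⟨h, t, rfl, hh⟩
  | cons x xs ih =>
    simp only [List.foldl_cons, bStep]
    by_cases hx : h.1 = x
    · simp only [hx]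
      exact ih (x, h.2 + 1) t (by simpa using by omega)
    · simp only [if_neg hx]
      exact ih (x, 1) ((h.1, h.2) :: t) (by norm_num)

theorem alt_small (m : Int) (x : Int) (xs : List Int) (hm : m ≤ 1) :
    validate_no_long_pattern_alt (x :: xs) m = false := by
  unfold validate_no_long_pattern_alt
  obtain ⟨h2, t2, he, hp⟩ := bFold_head_pos xs (x, 1) [] (by norm_num)
  simp only [List.foldl_cons, bStep, he]
  rw [List.all_reverse, List.all_cons]
  have : bOk m h2 = false := by simp [bOk]; omega
  simp [this]

-- With max_streak ≤ 1 and an adjacent equal pair present, A also fails.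
theorem aGo_dup (m : Int) (p : Int) (xs : List Int) (s : Int) (hm : m ≤ 1) (hs : 1 ≤ s)
    (hd : ¬ List.IsChain (fun a b => a ≠ b) (p :: xs)) :
    aGo m p xs s = false := by
  induction xs generalizing p s with
  | nil => exact absurd (List.isChain_singleton p) hd
  | cons x xs ih =>
    simp only [aGo]
    by_cases hx : x = p
    · rw [if_pos hx, if_pos (by omega)]
    · rw [if_neg hx]
      refine ih x 1 le_rfl ?_
      intro hc
      exact hd (List.isChain_cons_cons.mpr ⟨fun h => hx h.symm, hc⟩)

-- ===== VERDICT (by name: the statement is the Claim_ definition above) =====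
theorem validate_no_long_pattern_spec : Claim_equal_validate_no_long_pattern := by
  intro sequence max_streak _ hpre
  cases sequence with
  | nil => rfl
  | cons x xs =>
    show aGo max_streak x xs 1 = validate_no_long_pattern_alt (x :: xs) max_streak
    by_cases hm2 : 2 ≤ max_streak
    · have h := main_inv max_streak xs x 1 [] hm2 (by omega) (by omega)
      unfold validate_no_long_pattern_alt
      simp only [List.foldl_cons, List.all_reverse, bStep]
      rw [h]; simp
    · have hm1 : max_streak ≤ 1 := by omega
      have hnc : ¬ List.IsChain (fun a b => a ≠ b) (x :: xs) := by
        rcases hpre with h | h | h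
        · omega
        · exact absurd h (by simp)
        · exact h
      rw [aGo_dup max_streak x xs 1 hm1 (by norm_num) hnc, alt_small max_streak x xs hm1]
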